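-- pv_equiv track=rewrite | github.com/Naidze/advent-of-code | 2025/day_4/day_4_part_2.py | count_and_process
-- ===== SOURCE A (Python) =====
-- def check_horizontal(grid_lines, x, y):
--     reach_count = 0
--     if x == 0 or grid_lines[y][x - 1] == ".":
--         reach_count += 1
--     if x == len(grid_lines[y]) - 1 or grid_lines[y][x + 1] == ".":
--         reach_count += 1
--     return reach_count
--
-- def check_vertical(grid_lines, x, y):
--     reach_count = 0
--     if y == 0 or grid_lines[y - 1][x] == ".":
--         reach_count += 1
--     if y == len(grid_lines) - 1 or grid_lines[y + 1][x] == ".":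
--         reach_count += 1
--     return reach_count
--
-- def check_diagonal(grid_lines, x, y):
--     reach_count = 0
--     # top left
--     if x == 0 or y == 0 or grid_lines[y - 1][x - 1] == ".":
--         reach_count += 1
--     # top right
--     if x == len(grid_lines[y]) - 1 or y == 0 or grid_lines[y - 1][x + 1] == ".":
--         reach_count += 1
--     # bottom left
--     if x == 0 or y == len(grid_lines) - 1 or grid_lines[y + 1][x - 1] == ".":
--         reach_count += 1
--     # bottom right
--     if x == len(grid_lines[y]) - 1 or y == len(grid_lines) - 1 or grid_lines[y + 1][x + 1] == ".":
--         reach_count += 1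
--     return reach_count
--
-- def update_grid(grid, moved_coordinates):
--     for pos in moved_coordinates:
--         grid[pos[0]][pos[1]] = "."
--     return grid
--
-- def count_and_process(grid_lines):
--     grid = [list(line) for line in grid_lines]
--     total_count = 0
--     moved_coordinates = set()
--     for line_idx in range(0, len(grid_lines)):
--         for obj_idx in range(0, len(grid_lines[line_idx])):
--             if (grid[line_idx][obj_idx] == '.'):
--                 continue
--
--             reach_count = check_horizontal(grid, obj_idx, line_idx) + check_vertical(grid, obj_idx, line_idx) + check_diagonal(grid, obj_idx, line_idx)
--
--             if reach_count > 4: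
--                 total_count += 1
--                 moved_coordinates.add((line_idx, obj_idx))
--
--     new_grid = update_grid(grid, moved_coordinates)
--     return new_grid, total_count
-- ===== SOURCE B (Python) =====
-- def count_and_process(grid_lines):
--     pref = []
--     for row in grid_lines:
--         t = 0
--         p = [0]
--         for c in row:
--             t += c != '.'
--             p.append(t)
--         pref.append(p)
--     h = len(pref)
--     total = 0
--     new_grid = []
--     for y, row in enumerate(grid_lines):
--         w = len(row)
--         new_row = list(row)
--         rows = pref[max(y - 1, 0):min(y + 2, h)]
--         for x, c in enumerate(row):
--             if c == '.':
--                 continue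
--             lo = max(x - 1, 0)
--             hi = min(x + 2, w)
--             window = 0
--             for pn in rows:
--                 window += pn[hi] - pn[lo]
--             if window < 5:
--                 new_row[x] = '.'
--                 total += 1
--         new_grid.append(new_row)
--     return new_grid, total
-- ===== Notes on version B (the rewrite author's own statement) =====
-- stated objective: alternative
-- what changed: Instead of testing each cell's 8 directions for freeness with unrolled if-chains and patching the grid from a set, B first builds per-row prefix sums of a 0/1 occupancy and then, per occupied cell, takes a 3x3 window sum (clipped to the current row's width) as prefix-sum differences - counting occupied neighbours, the complement of A's free count - and clears the cell when the window sum is below 5.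
import Mathlib
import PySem

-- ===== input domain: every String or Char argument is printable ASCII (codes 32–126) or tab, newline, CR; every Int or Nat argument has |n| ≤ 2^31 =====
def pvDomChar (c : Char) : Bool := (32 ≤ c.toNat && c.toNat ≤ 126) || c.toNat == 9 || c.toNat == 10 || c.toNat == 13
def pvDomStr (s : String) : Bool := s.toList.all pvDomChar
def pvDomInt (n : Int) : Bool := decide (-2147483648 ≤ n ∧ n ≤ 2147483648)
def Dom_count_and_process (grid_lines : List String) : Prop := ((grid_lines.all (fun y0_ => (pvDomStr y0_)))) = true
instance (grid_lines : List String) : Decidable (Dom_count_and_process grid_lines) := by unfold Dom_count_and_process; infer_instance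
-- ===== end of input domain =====

-- B replaces A's per-direction free-count (three unrolled-if helpers, mark set, grid patching) by a
-- staged occupied-neighbour count: per-row prefix sums of the 0/1 occupancy are built first, then
-- each occupied cell takes its 3x3 window sum (clipped to the current row's width) as prefix-sum
-- differences and is cleared when it is below 5 (objective: alternative). Python A mutates no
-- argument; each port computes the return value only.

-- ===== PORT A =====
-- grid cells are 1-char strings (Python list(line)); indices are Nat (A only ever forms y±1, x±1
-- under guards keeping them ≥ 0 and, inside Pre_, in range, where List.getD _ _ is exact)
def check_horizontal (g : List (List String)) (x y : Nat) : Int :=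
  let reach_count : Int := 0
  let reach_count := if x = 0 ∨ (g.getD y []).getD (x - 1) "" = "." then reach_count + 1 else reach_count
  let reach_count := if x = (g.getD y []).length - 1 ∨ (g.getD y []).getD (x + 1) "" = "." then reach_count + 1 else reach_count
  reach_count

def check_vertical (g : List (List String)) (x y : Nat) : Int :=
  let reach_count : Int := 0
  let reach_count := if y = 0 ∨ (g.getD (y - 1) []).getD x "" = "." then reach_count + 1 else reach_count
  let reach_count := if y = g.length - 1 ∨ (g.getD (y + 1) []).getD x "" = "." then reach_count + 1 else reach_count
  reach_count

def check_diagonal (g : List (List String)) (x y : Nat) : Int :=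
  let reach_count : Int := 0
  -- top left
  let reach_count := if x = 0 ∨ y = 0 ∨ (g.getD (y - 1) []).getD (x - 1) "" = "." then reach_count + 1 else reach_count
  -- top right
  let reach_count := if x = (g.getD y []).length - 1 ∨ y = 0 ∨ (g.getD (y - 1) []).getD (x + 1) "" = "." then reach_count + 1 else reach_count
  -- bottom left
  let reach_count := if x = 0 ∨ y = g.length - 1 ∨ (g.getD (y + 1) []).getD (x - 1) "" = "." then reach_count + 1 else reach_count
  -- bottom right
  let reach_count := if x = (g.getD y []).length - 1 ∨ y = g.length - 1 ∨ (g.getD (y + 1) []).getD (x + 1) "" = "." then reach_count + 1 else reach_count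
  reach_count

-- Python iterates the set; the marked cells are all set to "." so the result is iteration-order
-- independent, and the port folds over the Set's underlying list (in-range writes, List.set exact)
def update_grid (grid : List (List String)) (moved_coordinates : List (Nat × Nat)) : List (List String) :=
  moved_coordinates.foldl (fun g pos => g.set pos.1 ((g.getD pos.1 []).set pos.2 ".")) grid

def count_and_process (grid_lines : List String) : List (List String) × Int :=
  let grid := grid_lines.map (fun line => line.toList.map (fun c => String.ofList [c]))
  let st : Int × PySem.Set (Nat × Nat) :=
    (List.range grid_lines.length).foldl (fun st line_idx =>
      (List.range (grid_lines.getD line_idx "").toList.length).foldl (fun st obj_idx =>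
        if (grid.getD line_idx []).getD obj_idx "" = "." then st
        else
          let reach_count := check_horizontal grid obj_idx line_idx
            + check_vertical grid obj_idx line_idx + check_diagonal grid obj_idx line_idx
          if reach_count > 4 then (st.1 + 1, PySem.Set.add st.2 (line_idx, obj_idx)) else st) st)
      (0, PySem.Set.empty)
  let new_grid := update_grid grid st.2
  (new_grid, st.1)

-- ===== PORT B =====
-- stage 1: per-row prefix sums of the 0/1 occupancy; stage 2: per occupied cell the 3x3 window sum
-- (clipped to the current row's width) as prefix-sum differences, clear when it is below 5
def count_and_process_alt (grid_lines : List String) : List (List String) × Int :=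
  let pref := grid_lines.foldl (fun pref row =>
    let tp := row.toList.foldl (fun (tp : Int × List Int) c =>
      let nt := tp.1 + (if c ≠ '.' then 1 else 0)
      (nt, tp.2 ++ [nt])) (0, [0])
    pref ++ [tp.2]) []
  let h : Int := pref.length
  let st : Int × List (List String) :=
    (PySem.List.enumerate grid_lines).foldl (fun (st : Int × List (List String)) p =>
      let w : Int := p.2.toList.length
      let rows := PySem.List.slice pref (some (max (p.1 - 1) 0)) (some (min (p.1 + 2) h))
      let r : Int × List String :=
        (PySem.List.enumerate p.2.toList).foldl (fun (r : Int × List String) q =>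
          if q.2 = '.' then r
          else
            let lo : Int := max (q.1 - 1) 0
            let hi : Int := min (q.1 + 2) w
            let window : Int := rows.foldl (fun wa pn =>
              wa + ((PySem.List.pyGet? pn hi).getD 0 - (PySem.List.pyGet? pn lo).getD 0)) 0
            if window < 5 then (r.1 + 1, r.2.set q.1.toNat ".")
            else r)
          (st.1, p.2.toList.map (fun c => String.ofList [c]))
      (r.1, st.2 ++ [r.2])) (0, [])
  (st.2, st.1)

-- ===== PRECONDITION & SPEC =====
def pvWlen (gl : List String) (y : Nat) : Nat := (gl.getD y "").toList.length
def pvChAt (gl : List String) (y x : Nat) : Char := (gl.getD y "").toList.getD x '?'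

-- Pre_ excludes exactly the ragged grids on which both Pythons raise IndexError: an occupied cell
-- whose neighbour row is too short to be probed at the columns the scan reads.
-- pvNbrOk gl y x: every neighbour row the scan probes from occupied cell (y,x) is long enough
def pvNbrOk (gl : List String) (y x : Nat) : Bool :=
  decide ((0 < y → x < pvWlen gl (y - 1)) ∧
    (y + 1 < gl.length → x < pvWlen gl (y + 1)) ∧
    (x + 1 < pvWlen gl y → 0 < y → x + 1 < pvWlen gl (y - 1)) ∧
    (x + 1 < pvWlen gl y → y + 1 < gl.length → x + 1 < pvWlen gl (y + 1)))

def Pre_count_and_process (grid_lines : List String) : Prop :=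
  ∀ y < grid_lines.length, ∀ x < pvWlen grid_lines y,
    pvChAt grid_lines y x ≠ '.' → pvNbrOk grid_lines y x = true
instance (grid_lines : List String) : Decidable (Pre_count_and_process grid_lines) := by
  unfold Pre_count_and_process; infer_instance

def pvWitness_count_and_process : List String := ["##.", "#.#", "..#"]

def Spec_count_and_process (grid_lines : List String) (out : List (List String) × Int) : Prop := out = count_and_process_alt grid_lines
instance (grid_lines : List String) (out : List (List String) × Int) : Decidable (Spec_count_and_process grid_lines out) := by unfold Spec_count_and_process; infer_instance

-- ===== CLAIM (what is proved, stated in full; the proofs are below) =====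
def Claim_equal_count_and_process : Prop := ∀ (grid_lines : List String), Dom_count_and_process grid_lines → Pre_count_and_process grid_lines → Spec_count_and_process grid_lines (count_and_process grid_lines)

-- ===== LEMMAS AND PROOFS =====

-- proof-side abbreviations
def pvG (gl : List String) : List (List String) :=
  gl.map (fun line => line.toList.map (fun c => String.ofList [c]))

def pvMark (gl : List String) (y x : Nat) : Bool :=
  !(((pvG gl).getD y []).getD x "" == ".") &&
    decide (check_horizontal (pvG gl) x y + check_vertical (pvG gl) x y
      + check_diagonal (pvG gl) x y > 4)

def pvTotal (gl : List String) : Int :=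
  ((List.range gl.length).map (fun y =>
    ((List.range (pvWlen gl y)).map (fun x => if pvMark gl y x then (1 : Int) else 0)).sum)).sum

-- the 0/1 occupied-neighbour indicator both sides are reduced to: 1 iff (ny, nx) lies inside the
-- grid (x-bound taken from the CENTRE row y, as A does) and holds a non-'.' character
def pvJ (gl : List String) (y : Nat) (ny nx : Int) : Int :=
  if 0 ≤ ny ∧ ny < (gl.length : Int) ∧ 0 ≤ nx ∧ nx < ((pvWlen gl y : Nat) : Int)
      ∧ pvChAt gl ny.toNat nx.toNat ≠ '.' then 1 else 0

def pvS8 (gl : List String) (y x : Nat) : Int :=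
  pvJ gl y ((y:Int) - 1) ((x:Int) - 1) + pvJ gl y ((y:Int) - 1) (x:Int) + pvJ gl y ((y:Int) - 1) ((x:Int) + 1)
  + pvJ gl y (y:Int) ((x:Int) - 1) + pvJ gl y (y:Int) ((x:Int) + 1)
  + pvJ gl y ((y:Int) + 1) ((x:Int) - 1) + pvJ gl y ((y:Int) + 1) (x:Int) + pvJ gl y ((y:Int) + 1) ((x:Int) + 1)

-- B's per-row prefix-sum build (the port's inner fold) and its closed form
def pvPrefFun (row : String) : List Int :=
  (row.toList.foldl (fun (tp : Int × List Int) c =>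
    let nt := tp.1 + (if c ≠ '.' then 1 else 0)
    (nt, tp.2 ++ [nt])) (0, [0])).2

def pvPrefs (gl : List String) : List (List Int) :=
  gl.foldl (fun pref row => pref ++ [pvPrefFun row]) []

def pvS (cs : List Char) (k : Nat) : Int :=
  ((cs.take k).map (fun c => if c = '.' then (0 : Int) else 1)).sum

-- bridges between the char-list grid and the strings
lemma pv_row (gl : List String) (y : Nat) :
    (pvG gl).getD y [] = (gl.getD y "").toList.map (fun c => String.ofList [c]) := by
  unfold pvG
  rw [show ([] : List String) = ("" : String).toList.map (fun c => String.ofList [c]) from rfl,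
    List.getD_map]

lemma pv_rowlen (gl : List String) (y : Nat) :
    ((pvG gl).getD y []).length = pvWlen gl y := by
  rw [pv_row]; simp [pvWlen]

lemma pv_glen (gl : List String) : (pvG gl).length = gl.length := by
  unfold pvG; simp

lemma pv_cell_val (gl : List String) {y x : Nat} (hx : x < pvWlen gl y) :
    ((pvG gl).getD y []).getD x "" = String.ofList [pvChAt gl y x] := by
  have hx'' : x < (gl.getD y "").toList.length := hx
  have hch : pvChAt gl y x = (gl.getD y "").toList[x] := by
    rw [pvChAt, List.getD_eq_getElem?_getD, List.getElem?_eq_getElem hx'']; rfl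
  rw [pv_row, List.getD_eq_getElem?_getD, List.getElem?_map, List.getElem?_eq_getElem hx'', hch]
  rfl

lemma pv_ofList_dot (c : Char) : (String.ofList [c] = ".") ↔ c = '.' := by
  constructor
  · intro h; have := congrArg String.toList h; simpa using this
  · intro h; subst h; rfl

lemma pv_chAt_dot_lt {gl : List String} {y x : Nat} (h : pvChAt gl y x = '.') :
    x < pvWlen gl y := by
  by_contra hge
  have hlen : (gl.getD y "").toList.length ≤ x := Nat.le_of_not_lt hge
  rw [pvChAt, List.getD_eq_getElem?_getD, List.getElem?_eq_none hlen] at h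
  simp at h

lemma pv_cell_dot (gl : List String) (y x : Nat) :
    (((pvG gl).getD y []).getD x "" = ".") ↔ pvChAt gl y x = '.' := by
  by_cases hx : x < pvWlen gl y
  · rw [pv_cell_val gl hx, pv_ofList_dot]
  · constructor
    · intro h
      exfalso
      have hlen : ((gl.getD y "").toList.map (fun c => String.ofList [c])).length ≤ x := by
        rw [List.length_map]; exact Nat.le_of_not_lt hx
      rw [pv_row, List.getD_eq_getElem?_getD, List.getElem?_eq_none hlen] at h
      simp at h
    · intro h; exact absurd (pv_chAt_dot_lt h) hx

-- pvJ facts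
lemma pvJ_natCast (gl : List String) (y a b : Nat) :
    pvJ gl y (a : Int) (b : Int)
      = if a < gl.length ∧ b < pvWlen gl y ∧ pvChAt gl a b ≠ '.' then 1 else 0 := by
  unfold pvJ
  simp only [Int.toNat_natCast]
  refine if_congr ?_ rfl rfl
  constructor
  · rintro ⟨-, h2, -, h4, h5⟩; exact ⟨by exact_mod_cast h2, by exact_mod_cast h4, h5⟩
  · rintro ⟨h2, h4, h5⟩
    exact ⟨Int.natCast_nonneg _, by exact_mod_cast h2, Int.natCast_nonneg _, by exact_mod_cast h4, h5⟩

lemma pvJ_row_oob (gl : List String) (y : Nat) {ny : Int} (nx : Int)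
    (h : ny < 0 ∨ (gl.length : Int) ≤ ny) : pvJ gl y ny nx = 0 := by
  unfold pvJ; rw [if_neg]; rintro ⟨h1, h2, -⟩; omega

lemma pvJ_col_oob (gl : List String) (y : Nat) (ny : Int) {nx : Int}
    (h : nx < 0 ∨ ((pvWlen gl y : Nat) : Int) ≤ nx) : pvJ gl y ny nx = 0 := by
  unfold pvJ; rw [if_neg]; rintro ⟨-, -, h3, h4, -⟩; omega

-- ===== A's reach count = 8 − the occupied-neighbour sum =====
-- A's helpers as flat 0/1 sums
lemma pv_ch_eq (g : List (List String)) (x y : Nat) : check_horizontal g x y =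
    (if x = 0 ∨ (g.getD y []).getD (x - 1) "" = "." then (1 : Int) else 0)
    + (if x = (g.getD y []).length - 1 ∨ (g.getD y []).getD (x + 1) "" = "." then 1 else 0) := by
  unfold check_horizontal; split_ifs <;> simp

lemma pv_cv_eq (g : List (List String)) (x y : Nat) : check_vertical g x y =
    (if y = 0 ∨ (g.getD (y - 1) []).getD x "" = "." then (1 : Int) else 0)
    + (if y = g.length - 1 ∨ (g.getD (y + 1) []).getD x "" = "." then 1 else 0) := by
  unfold check_vertical; split_ifs <;> simp

lemma pv_cd_eq (g : List (List String)) (x y : Nat) : check_diagonal g x y =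
    (if x = 0 ∨ y = 0 ∨ (g.getD (y - 1) []).getD (x - 1) "" = "." then (1 : Int) else 0)
    + (if x = (g.getD y []).length - 1 ∨ y = 0 ∨ (g.getD (y - 1) []).getD (x + 1) "" = "." then 1 else 0)
    + (if x = 0 ∨ y = g.length - 1 ∨ (g.getD (y + 1) []).getD (x - 1) "" = "." then 1 else 0)
    + (if x = (g.getD y []).length - 1 ∨ y = g.length - 1 ∨ (g.getD (y + 1) []).getD (x + 1) "" = "." then 1 else 0) := by
  unfold check_diagonal; split_ifs <;> simp

lemma pv_reach_eq (gl : List String) (y x : Nat) (hy : y < gl.length) (hx : x < pvWlen gl y) :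
    check_horizontal (pvG gl) x y + check_vertical (pvG gl) x y + check_diagonal (pvG gl) x y
      = 8 - pvS8 gl y x := by
  have eL : (if x = 0 ∨ ((pvG gl).getD y []).getD (x - 1) "" = "." then (1 : Int) else 0)
      = 1 - pvJ gl y (y : Int) ((x : Int) - 1) := by
    by_cases hx0 : x = 0
    · rw [if_pos (Or.inl hx0), pvJ_col_oob gl y _ (Or.inl (by omega))]; norm_num
    · rw [show ((x : Int) - 1) = ((x - 1 : Nat) : Int) by omega, pvJ_natCast]
      by_cases hc : pvChAt gl y (x - 1) = '.'
      · rw [if_pos (Or.inr ((pv_cell_dot gl y (x-1)).mpr hc)),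
          if_neg (by rintro ⟨-, -, h⟩; exact h hc)]
        norm_num
      · rw [if_neg (by intro hor; rcases hor with h | h; exacts [hx0 h, hc ((pv_cell_dot gl y (x-1)).mp h)]),
          if_pos ⟨hy, by omega, hc⟩]
        norm_num
  have eR : (if x = ((pvG gl).getD y []).length - 1 ∨ ((pvG gl).getD y []).getD (x + 1) "" = "." then (1 : Int) else 0)
      = 1 - pvJ gl y (y : Int) ((x : Int) + 1) := by
    rw [pv_rowlen, show ((x : Int) + 1) = ((x + 1 : Nat) : Int) by omega, pvJ_natCast]
    by_cases hxw : x + 1 < pvWlen gl y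
    · by_cases hc : pvChAt gl y (x + 1) = '.'
      · rw [if_pos (Or.inr ((pv_cell_dot gl y (x+1)).mpr hc)),
          if_neg (by rintro ⟨-, -, h⟩; exact h hc)]
        norm_num
      · rw [if_neg (by intro hor; rcases hor with h | h; exacts [absurd h (by omega), hc ((pv_cell_dot gl y (x+1)).mp h)]),
          if_pos ⟨hy, hxw, hc⟩]
        norm_num
    · rw [if_pos (Or.inl (by omega)), if_neg (by rintro ⟨-, h, -⟩; omega)]; norm_num
  have eU : (if y = 0 ∨ ((pvG gl).getD (y - 1) []).getD x "" = "." then (1 : Int) else 0)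
      = 1 - pvJ gl y ((y : Int) - 1) (x : Int) := by
    by_cases hy0 : y = 0
    · rw [if_pos (Or.inl hy0), pvJ_row_oob gl y _ (Or.inl (by omega))]; norm_num
    · rw [show ((y : Int) - 1) = ((y - 1 : Nat) : Int) by omega, pvJ_natCast]
      by_cases hc : pvChAt gl (y - 1) x = '.'
      · rw [if_pos (Or.inr ((pv_cell_dot gl (y-1) x).mpr hc)),
          if_neg (by rintro ⟨-, -, h⟩; exact h hc)]
        norm_num
      · rw [if_neg (by intro hor; rcases hor with h | h; exacts [hy0 h, hc ((pv_cell_dot gl (y-1) x).mp h)]),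
          if_pos ⟨by omega, hx, hc⟩]
        norm_num
  have eD : (if y = (pvG gl).length - 1 ∨ ((pvG gl).getD (y + 1) []).getD x "" = "." then (1 : Int) else 0)
      = 1 - pvJ gl y ((y : Int) + 1) (x : Int) := by
    rw [pv_glen, show ((y : Int) + 1) = ((y + 1 : Nat) : Int) by omega, pvJ_natCast]
    by_cases hyh : y + 1 < gl.length
    · by_cases hc : pvChAt gl (y + 1) x = '.'
      · rw [if_pos (Or.inr ((pv_cell_dot gl (y+1) x).mpr hc)),
          if_neg (by rintro ⟨-, -, h⟩; exact h hc)]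
        norm_num
      · rw [if_neg (by intro hor; rcases hor with h | h; exacts [absurd h (by omega), hc ((pv_cell_dot gl (y+1) x).mp h)]),
          if_pos ⟨hyh, hx, hc⟩]
        norm_num
    · rw [if_pos (Or.inl (by omega)), if_neg (by rintro ⟨h, -⟩; omega)]; norm_num
  have eTL : (if x = 0 ∨ y = 0 ∨ ((pvG gl).getD (y - 1) []).getD (x - 1) "" = "." then (1 : Int) else 0)
      = 1 - pvJ gl y ((y : Int) - 1) ((x : Int) - 1) := by
    by_cases hy0 : y = 0
    · rw [if_pos (Or.inr (Or.inl hy0)), pvJ_row_oob gl y _ (Or.inl (by omega))]; norm_num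
    · by_cases hx0 : x = 0
      · rw [if_pos (Or.inl hx0), pvJ_col_oob gl y _ (Or.inl (by omega))]; norm_num
      · rw [show ((y : Int) - 1) = ((y - 1 : Nat) : Int) by omega,
          show ((x : Int) - 1) = ((x - 1 : Nat) : Int) by omega, pvJ_natCast]
        by_cases hc : pvChAt gl (y - 1) (x - 1) = '.'
        · rw [if_pos (Or.inr (Or.inr ((pv_cell_dot gl (y-1) (x-1)).mpr hc))),
            if_neg (by rintro ⟨-, -, h⟩; exact h hc)]
          norm_num
        · rw [if_neg (by intro hor; rcases hor with h | h | h; exacts [hx0 h, hy0 h, hc ((pv_cell_dot gl (y-1) (x-1)).mp h)]),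
            if_pos ⟨by omega, by omega, hc⟩]
          norm_num
  have eTR : (if x = ((pvG gl).getD y []).length - 1 ∨ y = 0 ∨ ((pvG gl).getD (y - 1) []).getD (x + 1) "" = "." then (1 : Int) else 0)
      = 1 - pvJ gl y ((y : Int) - 1) ((x : Int) + 1) := by
    rw [pv_rowlen]
    by_cases hy0 : y = 0
    · rw [if_pos (Or.inr (Or.inl hy0)), pvJ_row_oob gl y _ (Or.inl (by omega))]; norm_num
    · by_cases hxw : x + 1 < pvWlen gl y
      · rw [show ((y : Int) - 1) = ((y - 1 : Nat) : Int) by omega,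
          show ((x : Int) + 1) = ((x + 1 : Nat) : Int) by omega, pvJ_natCast]
        by_cases hc : pvChAt gl (y - 1) (x + 1) = '.'
        · rw [if_pos (Or.inr (Or.inr ((pv_cell_dot gl (y-1) (x+1)).mpr hc))),
            if_neg (by rintro ⟨-, -, h⟩; exact h hc)]
          norm_num
        · rw [if_neg (by intro hor; rcases hor with h | h | h; exacts [absurd h (by omega), hy0 h, hc ((pv_cell_dot gl (y-1) (x+1)).mp h)]),
            if_pos ⟨by omega, hxw, hc⟩]
          norm_num
      · rw [if_pos (Or.inl (by omega)), pvJ_col_oob gl y _ (Or.inr (by omega))]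
        norm_num
  have eBL : (if x = 0 ∨ y = (pvG gl).length - 1 ∨ ((pvG gl).getD (y + 1) []).getD (x - 1) "" = "." then (1 : Int) else 0)
      = 1 - pvJ gl y ((y : Int) + 1) ((x : Int) - 1) := by
    rw [pv_glen]
    by_cases hx0 : x = 0
    · rw [if_pos (Or.inl hx0), pvJ_col_oob gl y _ (Or.inl (by omega))]; norm_num
    · by_cases hyh : y + 1 < gl.length
      · rw [show ((y : Int) + 1) = ((y + 1 : Nat) : Int) by omega,
          show ((x : Int) - 1) = ((x - 1 : Nat) : Int) by omega, pvJ_natCast]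
        by_cases hc : pvChAt gl (y + 1) (x - 1) = '.'
        · rw [if_pos (Or.inr (Or.inr ((pv_cell_dot gl (y+1) (x-1)).mpr hc))),
            if_neg (by rintro ⟨-, -, h⟩; exact h hc)]
          norm_num
        · rw [if_neg (by intro hor; rcases hor with h | h | h; exacts [hx0 h, absurd h (by omega), hc ((pv_cell_dot gl (y+1) (x-1)).mp h)]),
            if_pos ⟨hyh, by omega, hc⟩]
          norm_num
      · rw [if_pos (Or.inr (Or.inl (by omega))), pvJ_row_oob gl y _ (Or.inr (by omega))]
        norm_num
  have eBR : (if x = ((pvG gl).getD y []).length - 1 ∨ y = (pvG gl).length - 1 ∨ ((pvG gl).getD (y + 1) []).getD (x + 1) "" = "." then (1 : Int) else 0)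
      = 1 - pvJ gl y ((y : Int) + 1) ((x : Int) + 1) := by
    rw [pv_rowlen, pv_glen]
    by_cases hxw : x + 1 < pvWlen gl y
    · by_cases hyh : y + 1 < gl.length
      · rw [show ((y : Int) + 1) = ((y + 1 : Nat) : Int) by omega,
          show ((x : Int) + 1) = ((x + 1 : Nat) : Int) by omega, pvJ_natCast]
        by_cases hc : pvChAt gl (y + 1) (x + 1) = '.'
        · rw [if_pos (Or.inr (Or.inr ((pv_cell_dot gl (y+1) (x+1)).mpr hc))),
            if_neg (by rintro ⟨-, -, h⟩; exact h hc)]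
          norm_num
        · rw [if_neg (by intro hor; rcases hor with h | h | h; exacts [absurd h (by omega), absurd h (by omega), hc ((pv_cell_dot gl (y+1) (x+1)).mp h)]),
            if_pos ⟨hyh, hxw, hc⟩]
          norm_num
      · rw [if_pos (Or.inr (Or.inl (by omega))), pvJ_row_oob gl y _ (Or.inr (by omega))]
        norm_num
    · rw [if_pos (Or.inl (by omega)), pvJ_col_oob gl y _ (Or.inr (by omega))]
      norm_num
  rw [pv_ch_eq, pv_cv_eq, pv_cd_eq, eL, eR, eU, eD, eTL, eTR, eBL, eBR]
  unfold pvS8; ring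

-- ===== A's scan characterized through pvMark (grid-independent of B) =====
def pvBody (gl : List String) (li : Nat) :
    (Int × PySem.Set (Nat × Nat)) → Nat → (Int × PySem.Set (Nat × Nat)) :=
  fun st oi => if pvMark gl li oi then (st.1 + 1, PySem.Set.add st.2 (li, oi)) else st

lemma pv_body_eq (gl : List String) (li : Nat) :
    (fun (st : Int × PySem.Set (Nat × Nat)) oi =>
      if ((pvG gl).getD li []).getD oi "" = "." then st
      else
        if check_horizontal (pvG gl) oi li + check_vertical (pvG gl) oi li
            + check_diagonal (pvG gl) oi li > 4
        then (st.1 + 1, PySem.Set.add st.2 (li, oi)) else st)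
    = pvBody gl li := by
  funext st oi
  by_cases h1 : ((pvG gl).getD li []).getD oi "" = "." <;>
    by_cases h2 : check_horizontal (pvG gl) oi li + check_vertical (pvG gl) oi li
      + check_diagonal (pvG gl) oi li > 4 <;>
    simp [pvBody, pvMark, h2]

lemma pv_inner_fst (gl : List String) (li : Nat) :
    ∀ (l : List Nat) (st : Int × PySem.Set (Nat × Nat)),
      (l.foldl (pvBody gl li) st).1
        = st.1 + (l.map (fun x => if pvMark gl li x then (1 : Int) else 0)).sum := by
  intro l
  induction l with
  | nil => intro st; simp
  | cons a t ih =>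
    intro st
    by_cases h : pvMark gl li a <;> simp [pvBody, h, ih] <;> ring

lemma pv_inner_mem (gl : List String) (li : Nat) :
    ∀ (l : List Nat) (st : Int × PySem.Set (Nat × Nat)) (p : Nat × Nat),
      p ∈ (l.foldl (pvBody gl li) st).2
        ↔ p ∈ st.2 ∨ ∃ x ∈ l, pvMark gl li x ∧ p = (li, x) := by
  intro l
  induction l with
  | nil => intro st p; simp
  | cons a t ih =>
    intro st p
    by_cases h : pvMark gl li a
    · rw [show (a :: t).foldl (pvBody gl li) st
          = t.foldl (pvBody gl li) ((st.1 + 1, PySem.Set.add st.2 (li, a))) from by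
            simp [pvBody, h]]
      rw [ih]
      simp only [PySem.Set.mem_add, List.mem_cons]
      constructor
      · rintro ((hp | rfl) | ⟨x, hxt, hm, rfl⟩)
        · exact Or.inl hp
        · exact Or.inr ⟨a, Or.inl rfl, h, rfl⟩
        · exact Or.inr ⟨x, Or.inr hxt, hm, rfl⟩
      · rintro (hp | ⟨x, hax, hm, rfl⟩)
        · exact Or.inl (Or.inl hp)
        · rcases hax with rfl | hxt
          · exact Or.inl (Or.inr rfl)
          · exact Or.inr ⟨x, hxt, hm, rfl⟩
    · rw [show (a :: t).foldl (pvBody gl li) st = t.foldl (pvBody gl li) st from by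
        simp [pvBody, h]]
      rw [ih]
      constructor
      · rintro (hp | ⟨x, hxt, hm, rfl⟩)
        · exact Or.inl hp
        · exact Or.inr ⟨x, List.mem_cons_of_mem _ hxt, hm, rfl⟩
      · rintro (hp | ⟨x, hax, hm, rfl⟩)
        · exact Or.inl hp
        · rcases List.mem_cons.mp hax with rfl | hxt
          · exact absurd hm (by simp [h])
          · exact Or.inr ⟨x, hxt, hm, rfl⟩

lemma pv_outer_fst (gl : List String) :
    ∀ (l : List Nat) (st : Int × PySem.Set (Nat × Nat)),
      ((l.foldl (fun st li => (List.range (pvWlen gl li)).foldl (pvBody gl li) st) st).1)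
        = st.1 + (l.map (fun y =>
            ((List.range (pvWlen gl y)).map (fun x => if pvMark gl y x then (1 : Int) else 0)).sum)).sum := by
  intro l
  induction l with
  | nil => intro st; simp
  | cons a t ih =>
    intro st
    rw [List.foldl_cons, ih, pv_inner_fst]
    simp; ring

lemma pv_outer_mem (gl : List String) :
    ∀ (l : List Nat) (st : Int × PySem.Set (Nat × Nat)) (p : Nat × Nat),
      p ∈ ((l.foldl (fun st li => (List.range (pvWlen gl li)).foldl (pvBody gl li) st) st).2)
        ↔ p ∈ st.2 ∨ ∃ y ∈ l, ∃ x, x < pvWlen gl y ∧ pvMark gl y x ∧ p = (y, x) := by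
  intro l
  induction l with
  | nil => intro st p; simp
  | cons a t ih =>
    intro st p
    rw [List.foldl_cons, ih, pv_inner_mem]
    constructor
    · rintro ((hp | ⟨x, hxr, hm, rfl⟩) | ⟨y, hyt, x, hxw, hm, rfl⟩)
      · exact Or.inl hp
      · exact Or.inr ⟨a, List.mem_cons_self .., x, List.mem_range.mp hxr, hm, rfl⟩
      · exact Or.inr ⟨y, List.mem_cons_of_mem _ hyt, x, hxw, hm, rfl⟩
    · rintro (hp | ⟨y, hay, x, hxw, hm, rfl⟩)
      · exact Or.inl (Or.inl hp)
      · rcases List.mem_cons.mp hay with rfl | hyt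
        · exact Or.inl (Or.inr ⟨x, List.mem_range.mpr hxw, hm, rfl⟩)
        · exact Or.inr ⟨y, hyt, x, hxw, hm, rfl⟩

-- characterization of A's result
def pvScan (gl : List String) : Int × PySem.Set (Nat × Nat) :=
  (List.range gl.length).foldl
    (fun st li => (List.range (pvWlen gl li)).foldl (pvBody gl li) st)
    (0, PySem.Set.empty)

lemma pv_A_eq (gl : List String) :
    count_and_process gl = (update_grid (pvG gl) (pvScan gl).2, (pvScan gl).1) := by
  unfold count_and_process pvScan
  rw [show gl.map (fun line => line.toList.map (fun c => String.ofList [c])) = pvG gl from rfl]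
  simp only [pv_body_eq]
  rfl

lemma pv_scan_fst (gl : List String) : (pvScan gl).1 = pvTotal gl := by
  unfold pvScan
  rw [pv_outer_fst]
  simp [pvTotal]

lemma pv_scan_mem (gl : List String) (p : Nat × Nat) :
    p ∈ (pvScan gl).2 ↔ p.1 < gl.length ∧ p.2 < pvWlen gl p.1 ∧ pvMark gl p.1 p.2 := by
  unfold pvScan
  rw [pv_outer_mem]
  simp only [PySem.Set.empty, List.not_mem_nil, false_or, List.mem_range]
  constructor
  · rintro ⟨y, hy, x, hxw, hm, rfl⟩; exact ⟨hy, hxw, hm⟩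
  · rintro ⟨h1, h2, h3⟩; exact ⟨p.1, h1, p.2, h2, h3, rfl⟩

-- update_grid, cellwise
lemma pv_set_getD (g : List (List String)) (k y : Nat) (v : List String) :
    (g.set k v).getD y [] = if y = k ∧ k < g.length then v else g.getD y [] := by
  rcases eq_or_ne y k with rfl | hne
  · by_cases hk : y < g.length <;>
      simp [List.getD_eq_getElem?_getD, hk, List.set_eq_of_length_le, Nat.le_of_not_lt]
  · simp [List.getD_eq_getElem?_getD, List.getElem?_set_ne (fun h => hne h.symm), hne]

lemma pv_set_getD' (r : List String) (j x : Nat) (v : String) :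
    (r.set j v).getD x "" = if x = j ∧ j < r.length then v else r.getD x "" := by
  rcases eq_or_ne x j with rfl | hne
  · by_cases hk : x < r.length <;>
      simp [List.getD_eq_getElem?_getD, hk, List.set_eq_of_length_le, Nat.le_of_not_lt]
  · simp [List.getD_eq_getElem?_getD, List.getElem?_set_ne (fun h => hne h.symm), hne]

lemma pv_upd_len (cs : List (Nat × Nat)) : ∀ g, (update_grid g cs).length = g.length := by
  induction cs with
  | nil => intro g; rfl
  | cons c t ih =>
    intro g
    rw [show update_grid g (c :: t)
        = update_grid (g.set c.1 ((g.getD c.1 []).set c.2 ".")) t from rfl, ih]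
    simp

lemma pv_upd_row_len (cs : List (Nat × Nat)) :
    ∀ g y, ((update_grid g cs).getD y []).length = (g.getD y []).length := by
  induction cs with
  | nil => intro g y; rfl
  | cons c t ih =>
    intro g y
    rw [show update_grid g (c :: t)
        = update_grid (g.set c.1 ((g.getD c.1 []).set c.2 ".")) t from rfl, ih]
    rw [pv_set_getD]
    split_ifs with h
    · rcases h with ⟨rfl, _⟩; simp
    · rfl

lemma pv_upd_cell (cs : List (Nat × Nat)) :
    ∀ (g : List (List String)) (y x : Nat),
      ((update_grid g cs).getD y []).getD x ""
        = if (y, x) ∈ cs ∧ x < (g.getD y []).length then "." else (g.getD y []).getD x "" := by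
  induction cs with
  | nil => intro g y x; simp [update_grid]
  | cons c t ih =>
    obtain ⟨c1, c2⟩ := c
    intro g y x
    rw [show update_grid g ((c1, c2) :: t)
        = update_grid (g.set c1 ((g.getD c1 []).set c2 ".")) t from rfl, ih]
    have hrow : (g.set c1 ((g.getD c1 []).set c2 ".")).getD y []
        = if y = c1 ∧ c1 < g.length then (g.getD c1 []).set c2 "." else g.getD y [] :=
      pv_set_getD ..
    have hlen : ((g.set c1 ((g.getD c1 []).set c2 ".")).getD y []).length
        = (g.getD y []).length := by
      rw [hrow]; split_ifs with h
      · rcases h with ⟨rfl, _⟩; simp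
      · rfl
    have hrv : ((g.set c1 ((g.getD c1 []).set c2 ".")).getD y []).getD x ""
        = if (y, x) = (c1, c2) ∧ x < (g.getD y []).length then "."
          else (g.getD y []).getD x "" := by
      rw [hrow]
      by_cases h1 : y = c1 ∧ c1 < g.length
      · rw [if_pos h1]
        rcases h1 with ⟨rfl, hcl⟩
        rw [pv_set_getD']
        by_cases hxc : x = c2
        · subst hxc
          by_cases hL : x < (g.getD y []).length <;> simp
        · rw [if_neg (by rintro ⟨h, -⟩; exact hxc h),
            if_neg (by rintro ⟨h, -⟩; rw [Prod.mk.injEq] at h; exact hxc h.2)]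
      · rw [if_neg h1]
        rw [if_neg (by
          rintro ⟨heq, hlt⟩
          rw [Prod.mk.injEq] at heq
          obtain ⟨rfl, rfl⟩ := heq
          apply h1
          refine ⟨rfl, ?_⟩
          by_contra hcg
          have hnil : g.getD y [] = [] := by
            rw [List.getD_eq_getElem?_getD, List.getElem?_eq_none (Nat.le_of_not_lt hcg)]; rfl
          rw [hnil] at hlt
          simp at hlt)]
    rw [hlen, hrv]
    by_cases hL : x < (g.getD y []).length <;> by_cases hA : (y, x) ∈ t <;>
      by_cases hE : (y, x) = (c1, c2) <;>
      simp [List.mem_cons, hA, hE] <;> (intros; omega)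

-- B's enumerate comprehensions as maps over ranges
lemma pv_map_enum {α β : Type} (xs : List α) (d : α) (f : Int × α → β) :
    (PySem.List.enumerate xs).map f
      = (List.range xs.length).map (fun (k : Nat) => f ((k : Int), xs.getD k d)) := by
  rw [PySem.List.enumerate_eq_map_pyRange xs d]
  rw [show PySem.List.len xs = ((xs.length : Nat) : Int) from by simp [PySem.List.len_eq]]
  rw [PySem.List.pyRange_zero_nat, List.map_map, List.map_map]
  refine List.map_congr_left fun k _ => ?_
  simp [List.getD_eq_getElem?_getD]

lemma pv_enum_eq {α : Type} (xs : List α) (d : α) :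
    PySem.List.enumerate xs
      = (List.range xs.length).map (fun (k : Nat) => ((k : Int), xs.getD k d)) := by
  simpa using pv_map_enum xs d id

-- ===== B's window sums, reduced to the same indicator =====
lemma pv_sum_drop_take : ∀ (n a : Nat) (l : List Int), a + n ≤ l.length →
    ((l.drop a).take n).sum = ((List.range n).map (fun i => l.getD (a + i) 0)).sum := by
  intro n
  induction n with
  | zero => intro a l _; simp
  | succ n ih =>
    intro a l h
    have ha : a < l.length := by omega
    rw [List.drop_eq_getElem_cons ha, List.take_succ_cons, List.sum_cons,
      List.range_succ_eq_map, List.map_cons, List.sum_cons, List.map_map]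
    have h2 : ((List.range n).map ((fun i => l.getD (a + i) 0) ∘ Nat.succ))
        = (List.range n).map (fun i => l.getD ((a + 1) + i) 0) := by
      refine List.map_congr_left fun i _ => ?_
      simp only [Function.comp]
      congr 1
      omega
    rw [h2, ← ih (a + 1) l (by omega)]
    congr 1
    rw [List.getD_eq_getElem?_getD, Nat.add_zero, List.getElem?_eq_getElem ha]
    rfl

lemma pv_drop_take_list {α : Type} : ∀ (n a : Nat) (L : List α) (d : α), a + n ≤ L.length →
    (L.drop a).take n = (List.range n).map (fun i => L.getD (a + i) d) := by
  intro n
  induction n with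
  | zero => intro a L d _; simp
  | succ n ih =>
    intro a L d h
    have ha : a < L.length := by omega
    rw [List.drop_eq_getElem_cons ha, List.take_succ_cons,
      List.range_succ_eq_map, List.map_cons, List.map_map]
    have h2 : ((List.range n).map ((fun i => L.getD (a + i) d) ∘ Nat.succ))
        = (List.range n).map (fun i => L.getD ((a + 1) + i) d) := by
      refine List.map_congr_left fun i _ => ?_
      simp only [Function.comp]
      congr 1
      omega
    rw [h2, ← ih (a + 1) L d (by omega)]
    congr 1
    rw [List.getD_eq_getElem?_getD, Nat.add_zero, List.getElem?_eq_getElem ha]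
    rfl

lemma pv_pref_invariant : ∀ (cs : List Char) (t : Int) (p : List Int),
    (cs.foldl (fun (tp : Int × List Int) c =>
        let nt := tp.1 + (if c ≠ '.' then 1 else 0)
        (nt, tp.2 ++ [nt])) (t, p)).2
      = p ++ (List.range cs.length).map (fun k => t + pvS cs (k + 1)) := by
  intro cs
  induction cs with
  | nil => intro t p; simp
  | cons c cs' ih =>
    intro t p
    rw [List.foldl_cons]
    dsimp only
    rw [ih]
    rw [List.length_cons, List.range_succ_eq_map, List.map_cons, List.map_map]
    have hd : pvS (c :: cs') 1 = (if c ≠ '.' then 1 else 0) := by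
      by_cases hc : c = '.' <;> simp [pvS, hc]
    have htl : ((List.range cs'.length).map ((fun k => t + pvS (c :: cs') (k + 1)) ∘ Nat.succ))
        = (List.range cs'.length).map (fun k => (t + (if c ≠ '.' then 1 else 0)) + pvS cs' (k + 1)) := by
      refine List.map_congr_left fun k _ => ?_
      simp only [Function.comp]
      have : pvS (c :: cs') (k + 1 + 1) = (if c ≠ '.' then 1 else 0) + pvS cs' (k + 1) := by
        by_cases hc : c = '.' <;> simp [pvS, List.take_succ_cons, hc]
      rw [this]
      ring
    rw [htl]
    simp only [Nat.zero_add, hd]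
    rw [List.append_assoc]
    rfl

lemma pv_pref_eq (row : String) :
    pvPrefFun row = (List.range (row.toList.length + 1)).map (fun k => pvS row.toList k) := by
  unfold pvPrefFun
  rw [pv_pref_invariant]
  rw [List.range_succ_eq_map, List.map_cons, List.map_map]
  have h0 : pvS row.toList 0 = 0 := by simp [pvS]
  rw [h0, List.singleton_append]
  congr 1
  refine List.map_congr_left fun k _ => ?_
  simp only [Function.comp]
  ring

lemma pv_prefs_eq (gl : List String) : pvPrefs gl = gl.map pvPrefFun := by
  unfold pvPrefs
  have aux : ∀ (l : List String) (acc : List (List Int)),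
      l.foldl (fun pref row => pref ++ [pvPrefFun row]) acc = acc ++ l.map pvPrefFun := by
    intro l
    induction l with
    | nil => intro acc; simp
    | cons a tl ih => intro acc; rw [List.foldl_cons, ih]; simp
  simpa using aux gl []

lemma pv_pref_getD (cs : List Char) (k : Nat) (hk : k ≤ cs.length) :
    (((List.range (cs.length + 1)).map (fun j => pvS cs j))[k]?).getD 0 = pvS cs k := by
  rw [List.getElem?_map, List.getElem?_range (by omega)]
  rfl

lemma pv_S_diff (cs : List Char) (lo n : Nat) :
    pvS cs (lo + n) - pvS cs lo
      = (((cs.map (fun c => if c = '.' then (0 : Int) else 1)).drop lo).take n).sum := by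
  unfold pvS
  rw [List.map_take, List.map_take, List.take_add, List.sum_append, ← List.map_drop]
  ring

lemma pv_occ_getD (gl : List String) (ny k : Nat) (h : k < pvWlen gl ny) :
    ((gl.getD ny "").toList.map (fun c => if c = '.' then (0 : Int) else 1)).getD k 0
      = if pvChAt gl ny k = '.' then 0 else 1 := by
  have hk : k < (gl.getD ny "").toList.length := h
  have hch : pvChAt gl ny k = (gl.getD ny "").toList[k] := by
    rw [pvChAt, List.getD_eq_getElem?_getD, List.getElem?_eq_getElem hk]; rfl
  rw [List.getD_eq_getElem?_getD, List.getElem?_map, List.getElem?_eq_getElem hk, hch]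
  rfl

lemma pv_occJ (gl : List String) (y ny k : Nat) (hny : ny < gl.length)
    (hky : k < pvWlen gl y) (hkn : k < pvWlen gl ny) :
    ((gl.getD ny "").toList.map (fun c => if c = '.' then (0 : Int) else 1)).getD k 0
      = pvJ gl y (ny : Int) (k : Int) := by
  rw [pv_occ_getD gl ny k hkn, pvJ_natCast]
  by_cases hc : pvChAt gl ny k = '.' <;> simp [hc, hny, hky]

lemma pv_colsum (gl : List String) (y x ny : Nat) (hny : ny < gl.length) (hx : x < pvWlen gl y)
    (h1 : x < pvWlen gl ny) (h2 : x + 1 < pvWlen gl y → x + 1 < pvWlen gl ny) :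
    (PySem.List.pyGet? (pvPrefFun (gl.getD ny "")) (min ((x : Int) + 2) ((pvWlen gl y : Nat) : Int))).getD 0
      - (PySem.List.pyGet? (pvPrefFun (gl.getD ny "")) (max ((x : Int) - 1) 0)).getD 0
     = pvJ gl y (ny : Int) ((x : Int) - 1) + pvJ gl y (ny : Int) (x : Int)
       + pvJ gl y (ny : Int) ((x : Int) + 1) := by
  have hhi : min (x + 2) (pvWlen gl y) ≤ pvWlen gl ny := by
    by_cases hxw : x + 1 < pvWlen gl y
    · have := h2 hxw; omega
    · omega
  have hcslen : (gl.getD ny "").toList.length = pvWlen gl ny := rfl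
  rw [show (min ((x : Int) + 2) ((pvWlen gl y : Nat) : Int))
      = ((min (x + 2) (pvWlen gl y) : Nat) : Int) by omega,
    show (max ((x : Int) - 1) 0) = ((x - 1 : Nat) : Int) by omega,
    pv_pref_eq, PySem.List.pyGet?_of_nonneg _ (Int.natCast_nonneg _),
    PySem.List.pyGet?_of_nonneg _ (Int.natCast_nonneg _)]
  simp only [Int.toNat_natCast]
  rw [pv_pref_getD ((gl.getD ny "").toList) _ (by omega),
    pv_pref_getD ((gl.getD ny "").toList) _ (by omega)]
  rw [show min (x + 2) (pvWlen gl y) = (x - 1) + (min (x + 2) (pvWlen gl y) - (x - 1)) by omega,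
    pv_S_diff ((gl.getD ny "").toList) (x - 1) (min (x + 2) (pvWlen gl y) - (x - 1))]
  set l := (gl.getD ny "").toList.map (fun c => if c = '.' then (0 : Int) else 1) with hl
  have hlen : l.length = pvWlen gl ny := by rw [hl, List.length_map]; rfl
  by_cases hxw : x + 1 < pvWlen gl y
  · have h2' := h2 hxw
    by_cases hx0 : x = 0
    · subst hx0
      rw [show min (0 + 2) (pvWlen gl y) - (0 - 1) = 2 by omega,
        pv_sum_drop_take 2 (0 - 1) l (by omega)]
      simp only [List.range_succ, List.range_zero, List.map_append, List.map_cons, List.map_nil,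
        List.sum_append, List.sum_cons, List.sum_nil, Nat.zero_sub, Nat.zero_add]
      rw [pv_occJ gl y ny 0 hny (by omega) (by omega),
        pv_occJ gl y ny 1 hny (by omega) (by omega),
        pvJ_col_oob gl y ((ny : Nat) : Int) (nx := (((0 : Nat) : Int) - 1)) (Or.inl (by omega))]
      push_cast
      ring
    · rw [show min (x + 2) (pvWlen gl y) - (x - 1) = 3 by omega,
        pv_sum_drop_take 3 (x - 1) l (by omega)]
      simp only [List.range_succ, List.range_zero, List.map_append, List.map_cons, List.map_nil,
        List.sum_append, List.sum_cons, List.sum_nil]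
      rw [show x - 1 + 0 = x - 1 by omega, show x - 1 + 1 = x by omega,
        show x - 1 + 2 = x + 1 by omega,
        pv_occJ gl y ny (x - 1) hny (by omega) (by omega),
        pv_occJ gl y ny x hny hx h1,
        pv_occJ gl y ny (x + 1) hny (by omega) (by omega),
        show ((x - 1 : Nat) : Int) = (x : Int) - 1 by omega,
        show ((x + 1 : Nat) : Int) = (x : Int) + 1 by push_cast; ring]
      ring
  · have hw : pvWlen gl y = x + 1 := by omega
    by_cases hx0 : x = 0
    · subst hx0
      rw [show min (0 + 2) (pvWlen gl y) - (0 - 1) = 1 by omega,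
        pv_sum_drop_take 1 (0 - 1) l (by omega)]
      simp only [List.range_succ, List.range_zero, List.map_append, List.map_cons, List.map_nil,
        List.sum_append, List.sum_cons, List.sum_nil, Nat.zero_sub, Nat.zero_add]
      rw [pv_occJ gl y ny 0 hny (by omega) (by omega),
        pvJ_col_oob gl y ((ny : Nat) : Int) (nx := (((0 : Nat) : Int) - 1)) (Or.inl (by omega)),
        pvJ_col_oob gl y ((ny : Nat) : Int) (nx := (((0 : Nat) : Int) + 1)) (Or.inr (by push_cast; omega))]
      push_cast
      ring
    · rw [show min (x + 2) (pvWlen gl y) - (x - 1) = 2 by omega,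
        pv_sum_drop_take 2 (x - 1) l (by omega)]
      simp only [List.range_succ, List.range_zero, List.map_append, List.map_cons, List.map_nil,
        List.sum_append, List.sum_cons, List.sum_nil]
      rw [show x - 1 + 0 = x - 1 by omega, show x - 1 + 1 = x by omega,
        pv_occJ gl y ny (x - 1) hny (by omega) (by omega),
        pv_occJ gl y ny x hny hx h1,
        show ((x - 1 : Nat) : Int) = (x : Int) - 1 by omega,
        pvJ_col_oob gl y ((ny : Nat) : Int) (nx := ((x : Int) + 1)) (Or.inr (by omega))]
      ring

lemma pv_window_eq (gl : List String) (y x : Nat) (hy : y < gl.length) (hx : x < pvWlen gl y)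
    (hnb : pvNbrOk gl y x = true) :
    (PySem.List.slice (pvPrefs gl) (some (max ((y : Int) - 1) 0))
        (some (min ((y : Int) + 2) (((pvPrefs gl).length : Nat) : Int)))).foldl
      (fun wa pn => wa + ((PySem.List.pyGet? pn (min ((x : Int) + 2) ((pvWlen gl y : Nat) : Int))).getD 0
        - (PySem.List.pyGet? pn (max ((x : Int) - 1) 0)).getD 0)) 0
    = pvJ gl y (y : Int) (x : Int) + pvS8 gl y x := by
  unfold pvNbrOk at hnb
  obtain ⟨c1, c2, c3, c4⟩ := of_decide_eq_true hnb
  rw [pv_prefs_eq, List.length_map]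
  have row_y : (PySem.List.pyGet? (pvPrefFun (gl.getD y "")) (min ((x : Int) + 2) ((pvWlen gl y : Nat) : Int))).getD 0
        - (PySem.List.pyGet? (pvPrefFun (gl.getD y "")) (max ((x : Int) - 1) 0)).getD 0
      = pvJ gl y (y : Int) ((x : Int) - 1) + pvJ gl y (y : Int) (x : Int)
        + pvJ gl y (y : Int) ((x : Int) + 1) :=
    pv_colsum gl y x y hy hx hx (fun h => h)
  have hup0 : y = 0 → ∀ nx : Int, pvJ gl y ((y : Int) - 1) nx = 0 := fun hy0 nx =>
    pvJ_row_oob gl y nx (Or.inl (by omega))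
  have hdn0 : ¬ (y + 1 < gl.length) → ∀ nx : Int, pvJ gl y ((y : Int) + 1) nx = 0 := fun hyh nx =>
    pvJ_row_oob gl y nx (Or.inr (by omega))
  by_cases hy0 : y = 0 <;> by_cases hyh : y + 1 < gl.length
  · -- top row, at least two rows
    have row_dn : (PySem.List.pyGet? (pvPrefFun (gl.getD (y + 1) "")) (min ((x : Int) + 2) ((pvWlen gl y : Nat) : Int))).getD 0
          - (PySem.List.pyGet? (pvPrefFun (gl.getD (y + 1) "")) (max ((x : Int) - 1) 0)).getD 0
        = pvJ gl y (((y + 1 : Nat)) : Int) ((x : Int) - 1) + pvJ gl y (((y + 1 : Nat)) : Int) (x : Int)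
          + pvJ gl y (((y + 1 : Nat)) : Int) ((x : Int) + 1) :=
      pv_colsum gl y x (y + 1) hyh hx (c2 hyh) (fun h => c4 h hyh)
    rw [show max ((y : Int) - 1) 0 = ((y : Nat) : Int) by omega,
      show min ((y : Int) + 2) ((gl.length : Nat) : Int) = (((y + 2 : Nat)) : Int) by omega,
      PySem.List.slice_toNat _ (Int.natCast_nonneg _) (Int.natCast_nonneg _)]
    simp only [Int.toNat_natCast]
    rw [show (y + 2) - y = 2 by omega,
      pv_drop_take_list 2 y (gl.map pvPrefFun) (pvPrefFun "") (by rw [List.length_map]; omega)]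
    simp only [List.range_succ, List.range_zero, List.map_append, List.map_cons, List.map_nil,
      List.foldl_append, List.foldl_cons, List.foldl_nil, List.getD_map]
    rw [show y + 0 = y by omega]
    rw [row_y, row_dn]
    unfold pvS8
    rw [hup0 hy0 ((x : Int) - 1), hup0 hy0 ((x : Nat) : Int), hup0 hy0 ((x : Int) + 1),
      show (((y + 1 : Nat)) : Int) = (y : Int) + 1 by omega]
    ring
  · -- single row
    rw [show max ((y : Int) - 1) 0 = ((y : Nat) : Int) by omega,
      show min ((y : Int) + 2) ((gl.length : Nat) : Int) = (((y + 1 : Nat)) : Int) by omega,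
      PySem.List.slice_toNat _ (Int.natCast_nonneg _) (Int.natCast_nonneg _)]
    simp only [Int.toNat_natCast]
    rw [show (y + 1) - y = 1 by omega,
      pv_drop_take_list 1 y (gl.map pvPrefFun) (pvPrefFun "") (by rw [List.length_map]; omega)]
    simp only [List.range_succ, List.range_zero, List.map_append, List.map_cons, List.map_nil,
      List.foldl_append, List.foldl_cons, List.foldl_nil, List.getD_map]
    rw [show y + 0 = y by omega]
    rw [row_y]
    unfold pvS8
    rw [hup0 hy0 ((x : Int) - 1), hup0 hy0 ((x : Nat) : Int), hup0 hy0 ((x : Int) + 1),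
      hdn0 hyh ((x : Int) - 1), hdn0 hyh ((x : Nat) : Int), hdn0 hyh ((x : Int) + 1)]
    ring
  · -- middle row
    have row_up : (PySem.List.pyGet? (pvPrefFun (gl.getD (y - 1) "")) (min ((x : Int) + 2) ((pvWlen gl y : Nat) : Int))).getD 0
          - (PySem.List.pyGet? (pvPrefFun (gl.getD (y - 1) "")) (max ((x : Int) - 1) 0)).getD 0
        = pvJ gl y (((y - 1 : Nat)) : Int) ((x : Int) - 1) + pvJ gl y (((y - 1 : Nat)) : Int) (x : Int)
          + pvJ gl y (((y - 1 : Nat)) : Int) ((x : Int) + 1) :=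
      pv_colsum gl y x (y - 1) (by omega) hx (c1 (by omega)) (fun h => c3 h (by omega))
    have row_dn : (PySem.List.pyGet? (pvPrefFun (gl.getD (y + 1) "")) (min ((x : Int) + 2) ((pvWlen gl y : Nat) : Int))).getD 0
          - (PySem.List.pyGet? (pvPrefFun (gl.getD (y + 1) "")) (max ((x : Int) - 1) 0)).getD 0
        = pvJ gl y (((y + 1 : Nat)) : Int) ((x : Int) - 1) + pvJ gl y (((y + 1 : Nat)) : Int) (x : Int)
          + pvJ gl y (((y + 1 : Nat)) : Int) ((x : Int) + 1) :=
      pv_colsum gl y x (y + 1) hyh hx (c2 hyh) (fun h => c4 h hyh)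
    rw [show max ((y : Int) - 1) 0 = (((y - 1 : Nat)) : Int) by omega,
      show min ((y : Int) + 2) ((gl.length : Nat) : Int) = (((y + 2 : Nat)) : Int) by omega,
      PySem.List.slice_toNat _ (Int.natCast_nonneg _) (Int.natCast_nonneg _)]
    simp only [Int.toNat_natCast]
    rw [show (y + 2) - (y - 1) = 3 by omega,
      pv_drop_take_list 3 (y - 1) (gl.map pvPrefFun) (pvPrefFun "") (by rw [List.length_map]; omega)]
    simp only [List.range_succ, List.range_zero, List.map_append, List.map_cons, List.map_nil,
      List.foldl_append, List.foldl_cons, List.foldl_nil, List.getD_map]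
    rw [show y - 1 + 0 = y - 1 by omega, show y - 1 + 1 = y by omega,
      show y - 1 + 2 = y + 1 by omega]
    rw [row_up, row_y, row_dn]
    unfold pvS8
    rw [show (((y - 1 : Nat)) : Int) = (y : Int) - 1 by omega,
      show (((y + 1 : Nat)) : Int) = (y : Int) + 1 by omega]
    ring
  · -- bottom row, y > 0
    have row_up : (PySem.List.pyGet? (pvPrefFun (gl.getD (y - 1) "")) (min ((x : Int) + 2) ((pvWlen gl y : Nat) : Int))).getD 0
          - (PySem.List.pyGet? (pvPrefFun (gl.getD (y - 1) "")) (max ((x : Int) - 1) 0)).getD 0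
        = pvJ gl y (((y - 1 : Nat)) : Int) ((x : Int) - 1) + pvJ gl y (((y - 1 : Nat)) : Int) (x : Int)
          + pvJ gl y (((y - 1 : Nat)) : Int) ((x : Int) + 1) :=
      pv_colsum gl y x (y - 1) (by omega) hx (c1 (by omega)) (fun h => c3 h (by omega))
    rw [show max ((y : Int) - 1) 0 = (((y - 1 : Nat)) : Int) by omega,
      show min ((y : Int) + 2) ((gl.length : Nat) : Int) = (((y + 1 : Nat)) : Int) by omega,
      PySem.List.slice_toNat _ (Int.natCast_nonneg _) (Int.natCast_nonneg _)]
    simp only [Int.toNat_natCast]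
    rw [show (y + 1) - (y - 1) = 2 by omega,
      pv_drop_take_list 2 (y - 1) (gl.map pvPrefFun) (pvPrefFun "") (by rw [List.length_map]; omega)]
    simp only [List.range_succ, List.range_zero, List.map_append, List.map_cons, List.map_nil,
      List.foldl_append, List.foldl_cons, List.foldl_nil, List.getD_map]
    rw [show y - 1 + 0 = y - 1 by omega, show y - 1 + 1 = y by omega]
    rw [row_up, row_y]
    unfold pvS8
    rw [show (((y - 1 : Nat)) : Int) = (y : Int) - 1 by omega]
    rw [hdn0 hyh ((x : Int) - 1), hdn0 hyh ((x : Nat) : Int), hdn0 hyh ((x : Int) + 1)]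
    ring

lemma pv_cell_mark (gl : List String) (y x : Nat) (hy : y < gl.length) (hx : x < pvWlen gl y)
    (hc : pvChAt gl y x ≠ '.') (hnb : pvNbrOk gl y x = true) :
    ((PySem.List.slice (pvPrefs gl) (some (max ((y : Int) - 1) 0))
        (some (min ((y : Int) + 2) (((pvPrefs gl).length : Nat) : Int)))).foldl
      (fun wa pn => wa + ((PySem.List.pyGet? pn (min ((x : Int) + 2) ((pvWlen gl y : Nat) : Int))).getD 0
        - (PySem.List.pyGet? pn (max ((x : Int) - 1) 0)).getD 0)) 0 < 5)
    ↔ pvMark gl y x = true := by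
  rw [pv_window_eq gl y x hy hx hnb, pvJ_natCast, if_pos ⟨hy, hx, hc⟩]
  have hr := pv_reach_eq gl y x hy hx
  have hcell : ¬ (((pvG gl).getD y []).getD x "" = ".") := fun h => hc ((pv_cell_dot gl y x).mp h)
  have hb : (((pvG gl).getD y []).getD x "" == ".") = false := by simpa using hcell
  have hm : pvMark gl y x = true ↔ check_horizontal (pvG gl) x y + check_vertical (pvG gl) x y
      + check_diagonal (pvG gl) x y > 4 := by
    unfold pvMark
    rw [hb]
    simp
  rw [hm, hr]
  omega

-- Source B's inner per-cell step (row fixed to y), and its pvMark normal form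
def pvBody2 (gl : List String) (y : Nat) (r : Int × List String) (q : Int × Char) :
    Int × List String :=
  if q.2 = '.' then r
  else
    if (PySem.List.slice (pvPrefs gl) (some (max ((y : Int) - 1) 0))
          (some (min ((y : Int) + 2) (((pvPrefs gl).length : Nat) : Int)))).foldl
        (fun wa pn => wa + ((PySem.List.pyGet? pn (min (q.1 + 2) ((pvWlen gl y : Nat) : Int))).getD 0
          - (PySem.List.pyGet? pn (max (q.1 - 1) 0)).getD 0)) 0 < 5
    then (r.1 + 1, r.2.set q.1.toNat ".") else r

def pvBodyB (gl : List String) (y : Nat) (r : Int × List String) (k : Nat) : Int × List String :=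
  if pvMark gl y k then (r.1 + 1, r.2.set k ".") else r

lemma pv_step (gl : List String) (hPre : Pre_count_and_process gl) (y k : Nat)
    (hy : y < gl.length) (hk : k < pvWlen gl y) (r : Int × List String) :
    pvBody2 gl y r ((k : Int), pvChAt gl y k) = pvBodyB gl y r k := by
  unfold pvBody2 pvBodyB
  by_cases hc : pvChAt gl y k = '.'
  · have hmark : pvMark gl y k = false := by
      have hcell := (pv_cell_dot gl y k).mpr hc
      unfold pvMark
      rw [hcell]
      simp
    rw [if_pos hc, hmark]
    simp
  · rw [if_neg hc]
    have hnb := hPre y hy k hk hc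
    have hiff := pv_cell_mark gl y k hy hk hc hnb
    simp only [Int.toNat_natCast]
    by_cases hw : (PySem.List.slice (pvPrefs gl) (some (max ((y : Int) - 1) 0))
          (some (min ((y : Int) + 2) (((pvPrefs gl).length : Nat) : Int)))).foldl
        (fun wa pn => wa + ((PySem.List.pyGet? pn (min ((k : Int) + 2) ((pvWlen gl y : Nat) : Int))).getD 0
          - (PySem.List.pyGet? pn (max ((k : Int) - 1) 0)).getD 0)) 0 < 5
    · rw [if_pos hw, if_pos (hiff.mp hw)]
    · rw [if_neg hw, if_neg (fun h => hw (hiff.mpr h))]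

lemma pv_fold_split (gl : List String) (y : Nat) :
    ∀ (l : List Nat) (t : Int) (row : List String),
      l.foldl (pvBodyB gl y) (t, row)
        = (t + (l.map (fun k => if pvMark gl y k then (1 : Int) else 0)).sum,
           l.foldl (fun row k => if pvMark gl y k then row.set k "." else row) row) := by
  intro l
  induction l with
  | nil => intro t row; simp
  | cons a tl ih =>
    intro t row
    by_cases h : pvMark gl y a <;> simp [pvBodyB, h, ih] <;> ring

lemma pv_setfold_len (gl : List String) (y : Nat) :
    ∀ (l : List Nat) (row : List String),
      (l.foldl (fun row k => if pvMark gl y k then row.set k "." else row) row).length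
        = row.length := by
  intro l
  induction l with
  | nil => intro row; rfl
  | cons a tl ih =>
    intro row
    by_cases h : pvMark gl y a <;> simp [h, ih]

lemma pv_setfold_getD (gl : List String) (y : Nat) :
    ∀ (l : List Nat) (row : List String) (j : Nat),
      (l.foldl (fun row k => if pvMark gl y k then row.set k "." else row) row).getD j ""
        = if j ∈ l ∧ pvMark gl y j = true ∧ j < row.length then "." else row.getD j "" := by
  intro l
  induction l with
  | nil => intro row j; simp
  | cons a tl ih =>
    intro row j
    rw [List.foldl_cons]
    by_cases h : pvMark gl y a
    · rw [if_pos h, ih, List.length_set, pv_set_getD']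
      by_cases hja : j = a
      · subst hja
        by_cases hjr : j < row.length
        · simp [hjr, h]
        · simp [hjr]
      · by_cases hjt : j ∈ tl <;> simp [hja, hjt, List.mem_cons]
    · rw [if_neg h, ih]
      by_cases hja : j = a
      · subst hja
        simp [List.mem_cons, h]
      · simp [List.mem_cons, hja]

lemma pv_ext_getD (l1 l2 : List String) (hlen : l1.length = l2.length)
    (h : ∀ j < l1.length, l1.getD j "" = l2.getD j "") : l1 = l2 := by
  apply List.ext_getElem hlen
  intro i h1 h2
  have hi := h i h1
  rwa [List.getD_eq_getElem?_getD, List.getD_eq_getElem?_getD,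
    List.getElem?_eq_getElem h1, List.getElem?_eq_getElem h2] at hi

lemma pv_row_canon (gl : List String) (y : Nat) :
    (List.range (pvWlen gl y)).foldl (fun row k => if pvMark gl y k then row.set k "." else row)
        ((gl.getD y "").toList.map (fun c => String.ofList [c]))
      = (List.range (pvWlen gl y)).map
          (fun x => if pvMark gl y x then "." else String.ofList [pvChAt gl y x]) := by
  have hlen0 : ((gl.getD y "").toList.map (fun c => String.ofList [c])).length = pvWlen gl y := by
    rw [List.length_map]; rfl
  apply pv_ext_getD
  · rw [pv_setfold_len, hlen0, List.length_map, List.length_range]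
  · intro j hj1
    have hjw : j < pvWlen gl y := by rwa [pv_setfold_len, hlen0] at hj1
    have hR : ((List.range (pvWlen gl y)).map
          (fun x => if pvMark gl y x then "." else String.ofList [pvChAt gl y x])).getD j ""
        = if pvMark gl y j then "." else String.ofList [pvChAt gl y j] := by
      rw [List.getD_eq_getElem?_getD, List.getElem?_map, List.getElem?_range hjw]
      rfl
    rw [pv_setfold_getD, hR]
    by_cases h : pvMark gl y j
    · rw [if_pos ⟨List.mem_range.mpr hjw, h, by rw [hlen0]; exact hjw⟩, if_pos h]
    · rw [if_neg (by rintro ⟨-, hm, -⟩; exact h hm), if_neg h, ← pv_row, pv_cell_val gl hjw]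

lemma pv_rowfold (gl : List String) (hPre : Pre_count_and_process gl) (y : Nat)
    (hy : y < gl.length) (t : Int) :
    (List.range (pvWlen gl y)).foldl (fun (r : Int × List String) (k : Nat) => pvBody2 gl y r ((k : Int), pvChAt gl y k))
        (t, (gl.getD y "").toList.map (fun c => String.ofList [c]))
      = (t + ((List.range (pvWlen gl y)).map (fun x => if pvMark gl y x then (1 : Int) else 0)).sum,
         (List.range (pvWlen gl y)).map
           (fun x => if pvMark gl y x then "." else String.ofList [pvChAt gl y x])) := by
  have hcongr : (List.range (pvWlen gl y)).foldl
        (fun (r : Int × List String) (k : Nat) => pvBody2 gl y r ((k : Int), pvChAt gl y k))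
        (t, (gl.getD y "").toList.map (fun c => String.ofList [c]))
      = (List.range (pvWlen gl y)).foldl (pvBodyB gl y)
        (t, (gl.getD y "").toList.map (fun c => String.ofList [c])) := by
    exact PySem.List.foldl_congr_mem _ _ _ _
      (fun r k hk => pv_step gl hPre y k hy (List.mem_range.mp hk) r)
  rw [hcongr, pv_fold_split, pv_row_canon]

lemma pv_outer_B (gl : List String) (hPre : Pre_count_and_process gl) :
    ∀ (l : List Nat), (∀ k ∈ l, k < gl.length) → ∀ (t : Int) (acc : List (List String)),
      l.foldl (fun (st : Int × List (List String)) y =>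
          let r := (List.range (pvWlen gl y)).foldl
            (fun (r : Int × List String) (k : Nat) => pvBody2 gl y r ((k : Int), pvChAt gl y k))
            (st.1, (gl.getD y "").toList.map (fun c => String.ofList [c]))
          (r.1, st.2 ++ [r.2])) (t, acc)
        = (t + (l.map (fun y =>
            ((List.range (pvWlen gl y)).map (fun x => if pvMark gl y x then (1 : Int) else 0)).sum)).sum,
           acc ++ l.map (fun y => (List.range (pvWlen gl y)).map
             (fun x => if pvMark gl y x then "." else String.ofList [pvChAt gl y x]))) := by
  intro l
  induction l with
  | nil => intro _ t acc; simp
  | cons a tl ih =>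
    intro hmem t acc
    rw [List.foldl_cons]
    dsimp only
    rw [pv_rowfold gl hPre a (hmem a (List.mem_cons_self ..)) t,
      ih (fun k hk => hmem k (List.mem_cons_of_mem _ hk))]
    simp [List.append_assoc]
    ring

lemma pv_alt_eq (gl : List String) :
    count_and_process_alt gl
      = (((List.range gl.length).foldl (fun (st : Int × List (List String)) y =>
            let r := (List.range (pvWlen gl y)).foldl
              (fun (r : Int × List String) (k : Nat) => pvBody2 gl y r ((k : Int), pvChAt gl y k))
              (st.1, (gl.getD y "").toList.map (fun c => String.ofList [c]))
            (r.1, st.2 ++ [r.2])) (0, [])).2,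
         ((List.range gl.length).foldl (fun (st : Int × List (List String)) y =>
            let r := (List.range (pvWlen gl y)).foldl
              (fun (r : Int × List String) (k : Nat) => pvBody2 gl y r ((k : Int), pvChAt gl y k))
              (st.1, (gl.getD y "").toList.map (fun c => String.ofList [c]))
            (r.1, st.2 ++ [r.2])) (0, [])).1) := by
  simp only [count_and_process_alt]
  rw [pv_enum_eq gl "", List.foldl_map]
  have hfun : ∀ (st : Int × List (List String)) (k : Nat),
      ((((PySem.List.enumerate (gl.getD k "").toList).foldl (fun (r : Int × List String) (q : Int × Char) =>
          if q.2 = '.' then r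
          else
            if (PySem.List.slice (pvPrefs gl) (some (max ((k : Int) - 1) 0))
                  (some (min ((k : Int) + 2) (((pvPrefs gl).length : Nat) : Int)))).foldl
                (fun wa pn => wa + ((PySem.List.pyGet? pn (min (q.1 + 2) ((gl.getD k "").toList.length : Int))).getD 0
                  - (PySem.List.pyGet? pn (max (q.1 - 1) 0)).getD 0)) 0 < 5
            then (r.1 + 1, r.2.set q.1.toNat ".") else r)
          (st.1, (gl.getD k "").toList.map (fun c => String.ofList [c]))).1,
        st.2 ++ [((PySem.List.enumerate (gl.getD k "").toList).foldl (fun (r : Int × List String) (q : Int × Char) =>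
          if q.2 = '.' then r
          else
            if (PySem.List.slice (pvPrefs gl) (some (max ((k : Int) - 1) 0))
                  (some (min ((k : Int) + 2) (((pvPrefs gl).length : Nat) : Int)))).foldl
                (fun wa pn => wa + ((PySem.List.pyGet? pn (min (q.1 + 2) ((gl.getD k "").toList.length : Int))).getD 0
                  - (PySem.List.pyGet? pn (max (q.1 - 1) 0)).getD 0)) 0 < 5
            then (r.1 + 1, r.2.set q.1.toNat ".") else r)
          (st.1, (gl.getD k "").toList.map (fun c => String.ofList [c]))).2]))
      = ((fun (st : Int × List (List String)) y =>
          let r := (List.range (pvWlen gl y)).foldl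
            (fun (r : Int × List String) (k : Nat) => pvBody2 gl y r ((k : Int), pvChAt gl y k))
            (st.1, (gl.getD y "").toList.map (fun c => String.ofList [c]))
          (r.1, st.2 ++ [r.2])) st k) := by
    intro st k
    rw [pv_enum_eq (gl.getD k "").toList '?', List.foldl_map]
    rfl
  exact congrArg (fun z : Int × List (List String) => (z.2, z.1))
    (PySem.List.foldl_congr_mem _ _ _ _ (fun st k _ => hfun st k))

lemma pv_main (gl : List String) (hPre : Pre_count_and_process gl) :
    count_and_process gl = count_and_process_alt gl := by
  rw [pv_A_eq gl, pv_alt_eq gl]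
  rw [pv_outer_B gl hPre (List.range gl.length) (fun k hk => List.mem_range.mp hk) 0 []]
  simp only [List.nil_append, zero_add]
  refine Prod.ext ?_ ?_
  · -- the grids
    dsimp only
    apply List.ext_getElem
    · rw [pv_upd_len, pv_glen, List.length_map, List.length_range]
    · intro y hy1 hy2
      have hy : y < gl.length := by rwa [pv_upd_len, pv_glen] at hy1
      rw [List.getElem_map, List.getElem_range]
      have hrowA : (update_grid (pvG gl) (pvScan gl).2)[y]
          = (update_grid (pvG gl) (pvScan gl).2).getD y [] := by
        rw [List.getD_eq_getElem?_getD, List.getElem?_eq_getElem hy1]; rfl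
      apply List.ext_getElem
      · rw [List.length_map, List.length_range, hrowA, pv_upd_row_len, pv_rowlen]
      · intro x hx1 hx2
        have hx : x < pvWlen gl y := by
          rwa [List.length_map, List.length_range] at hx2
        have hcellA : (update_grid (pvG gl) (pvScan gl).2)[y][x]
            = ((update_grid (pvG gl) (pvScan gl).2).getD y []).getD x "" := by
          rw [List.getD_eq_getElem?_getD]
          conv_rhs => rw [hrowA.symm]
          rw [List.getElem?_eq_getElem hx1]
          rfl
        rw [hcellA, pv_upd_cell, pv_rowlen, List.getElem_map, List.getElem_range]
        cases h : pvMark gl y x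
        · have hnm : ¬ ((y, x) ∈ (pvScan gl).2 ∧ x < pvWlen gl y) := by
            rintro ⟨hmem, -⟩
            have hsm := (pv_scan_mem gl (y, x)).mp hmem
            rw [h] at hsm
            simp at hsm
          rw [if_neg hnm, if_neg (by simp), pv_cell_val gl hx]
        · rw [if_pos ⟨(pv_scan_mem gl (y, x)).mpr ⟨hy, hx, h⟩, hx⟩, if_pos (by simp)]
  · -- the totals
    dsimp only
    rw [pv_scan_fst, pvTotal]

-- ===== VERDICT (by name: the statement is the Claim_ definition above) =====
theorem count_and_process_spec : Claim_equal_count_and_process := by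
  intro gl _ hPre
  unfold Spec_count_and_process
  exact pv_main gl hPre
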